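-- pv_equiv track=rewrite | github.com/aryana2/Programming-for-Data-Analysis-ECE-143- | HW 5/word_length/word_length/word_length.py | get_longest_words_startswith
-- ===== SOURCE A (Python) =====
-- def get_longest_words_startswith(words, start):
--     '''Determine longest word that starts with a given character'''
--     assert isinstance(words, list)
--     assert all(isinstance(w, str) for w in words)
--     assert all(len(w) > 0 for w in words)
--     assert isinstance(start, str)
--     assert len(start) == 1
--     assert start.isalpha()
--     words = [s for s in words if s[0] == start]
--     len_words = [len(s) for s in words]
--     return words[len_words.index(max(len_words))]
-- ===== SOURCE B (Python) =====
-- def get_longest_words_startswith(words, start):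
--     '''Determine longest word that starts with a given character'''
--     assert isinstance(words, list)
--     assert all(isinstance(w, str) for w in words)
--     assert all(len(w) > 0 for w in words)
--     assert isinstance(start, str)
--     assert len(start) == 1
--     assert start.isalpha()
--     matching = [s for s in words if s.startswith(start)]
--     return sorted(matching, key=len, reverse=True)[0]
-- ===== Notes on version B (the rewrite author's own statement) =====
-- stated objective: alternative
-- what changed: Replaces the length-list / max / index scan with a stable descending sort by length of the matching words and taking the first element; stability of Python's sort makes the head the first word of maximal length, matching A's first-longest tie behaviour.
import Mathlib
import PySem

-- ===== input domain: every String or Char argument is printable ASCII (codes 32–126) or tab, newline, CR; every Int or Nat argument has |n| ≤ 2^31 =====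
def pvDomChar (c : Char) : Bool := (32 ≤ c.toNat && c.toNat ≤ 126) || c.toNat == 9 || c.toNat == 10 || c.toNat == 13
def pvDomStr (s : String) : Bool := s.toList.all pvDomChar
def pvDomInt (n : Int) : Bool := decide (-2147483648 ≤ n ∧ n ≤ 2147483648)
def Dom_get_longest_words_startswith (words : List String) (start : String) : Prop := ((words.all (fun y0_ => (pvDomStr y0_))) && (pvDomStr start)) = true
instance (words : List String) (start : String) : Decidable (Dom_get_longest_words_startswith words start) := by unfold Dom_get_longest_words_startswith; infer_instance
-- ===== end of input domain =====

-- B replaces A's length-list / max / index scan by a stable descending sort by length of the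
-- matching words and taking its first element (alternative algorithm, O(n log n) vs O(n));
-- A = B proved on all inputs where A returns.


-- ===== PORT A =====
-- words = [s for s in words if s[0] == start]; len_words = [len(s) for s in words];
-- return words[len_words.index(max(len_words))]
def get_longest_words_startswith (words : List String) (start : String) : String :=
  let ws := words.filter (fun s => (PySem.Str.pyGet? s 0).map (fun c => String.ofList [c]) == some start)
  let len_words := ws.map PySem.Str.len
  match PySem.List.max? len_words (fun x => x) with
  | none => ""          -- max([]) raises ValueError: excluded by Pre_
  | some m =>
    match PySem.List.index? len_words m with
    | none => ""        -- unreachable: m is a member of len_words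
    | some i => ws.getD i ""

-- ===== PORT B =====
-- matching = [s for s in words if s.startswith(start)]
-- return sorted(matching, key=len, reverse=True)[0]
def get_longest_words_startswith_alt (words : List String) (start : String) : String :=
  let matching := words.filter (fun s => PySem.Str.startswith s start)
  match PySem.List.pyGet? (PySem.List.sorted matching PySem.Str.len true) 0 with
  | none => ""          -- [0] on an empty list raises IndexError: excluded by Pre_
  | some w => w

-- ===== PRECONDITION & SPEC =====
-- Pre_ excludes exactly the inputs where A raises: an empty word (AssertionError), start not a
-- single alphabetic character (AssertionError), and no word starting with start (ValueError).
def Pre_get_longest_words_startswith (words : List String) (start : String) : Prop :=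
  (words.all (fun w => !w.toList.isEmpty)) = true ∧
  start.toList.length = 1 ∧
  (start.toList.all (fun c => PySem.Str.isalpha c)) = true ∧
  (words.any (fun w => PySem.Str.startswith w start)) = true
instance (words : List String) (start : String) : Decidable (Pre_get_longest_words_startswith words start) := by unfold Pre_get_longest_words_startswith; infer_instance

def pvWitness_get_longest_words_startswith : List String × String := (["ab"], "a")

def Spec_get_longest_words_startswith (words : List String) (start : String) (out : String) : Prop := out = get_longest_words_startswith_alt words start
instance (words : List String) (start : String) (out : String) : Decidable (Spec_get_longest_words_startswith words start out) := by unfold Spec_get_longest_words_startswith; infer_instance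

-- ===== CLAIM (what is proved, stated in full; the proofs are below) =====
def Claim_equal_get_longest_words_startswith : Prop := ∀ (words : List String) (start : String), Dom_get_longest_words_startswith words start → Pre_get_longest_words_startswith words start → Spec_get_longest_words_startswith words start (get_longest_words_startswith words start)

-- ===== LEMMAS AND PROOFS =====

-- list indexing at 0 is head?
theorem pvPyGetZero {α : Type} (xs : List α) : PySem.List.pyGet? xs (0 : Int) = xs.head? := by
  cases xs <;> simp [PySem.List.pyGet?, PySem.List.pyIdx?]

-- folding max?'s step from a 'some' accumulator is the plain first-max fold
theorem pvFoldlMaxSome {α : Type} (key : α → Int) (t : List α) :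
    ∀ b : α, t.foldl (fun acc x => match acc with
      | none => some x
      | some m => if key m < key x then some x else some m) (some b)
    = some (t.foldl (fun m x => if key m < key x then x else m) b) := by
  induction t with
  | nil => intro b; rfl
  | cons y t ih =>
    intro b
    simp only [List.foldl]
    by_cases h : key b < key y <;> simp [h, ih]

-- max? of a nonempty list is the first-max fold over its tail
theorem pvMaxCons {α : Type} (key : α → Int) (v : α) (t : List α) :
    PySem.List.max? (v :: t) key
      = some (t.foldl (fun m x => if key m < key x then x else m) v) := by
  show (v :: t).foldl _ none = _
  simp only [List.foldl]
  exact pvFoldlMaxSome key t v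

-- the head of an insertion step: a strictly larger key takes the head, otherwise it stays
theorem pvHeadInsertBy {α : Type} (key : α → Int) (x h : α) (r : List α) :
    (PySem.List.insertBy (fun a b => decide (key b < key a)) x (h :: r)).head?
      = some (if key h < key x then x else h) := by
  by_cases hlt : key h < key x <;> simp [PySem.List.insertBy, hlt]

-- invariant of the insertion-sort fold: the head of the accumulator tracks the first max
theorem pvHeadFoldInsert {α : Type} (key : α → Int) (t : List α) :
    ∀ (acc : List α) (m : α), acc.head? = some m →
    (t.foldl (fun acc x => PySem.List.insertBy (fun a b => decide (key b < key a)) x acc) acc).head?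
      = some (t.foldl (fun m x => if key m < key x then x else m) m) := by
  induction t with
  | nil => intro acc m h; simpa using h
  | cons y t ih =>
    intro acc m h
    cases acc with
    | nil => simp at h
    | cons a r =>
      have hm : a = m := by simpa using h
      subst hm
      simp only [List.foldl]
      cases hins : PySem.List.insertBy (fun p q => decide (key q < key p)) y (a :: r) with
      | nil =>
        have : (PySem.List.insertBy (fun p q => decide (key q < key p)) y (a :: r)).head?
            = some (if key a < key y then y else a) := pvHeadInsertBy key y a r
        rw [hins] at this; simp at this
      | cons b s =>
        have hb : b = if key a < key y then y else a := by
          have := pvHeadInsertBy key y a r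
          rw [hins] at this; simpa using this
        subst hb
        exact ih _ _ rfl

-- the head of the stable descending sort is max?'s pick (the first element of maximal key)
theorem pvHeadSortedRev {α : Type} (key : α → Int) (xs : List α) :
    (PySem.List.sorted xs key true).head? = PySem.List.max? xs key := by
  cases xs with
  | nil => simp [PySem.List.sorted, PySem.List.max?]
  | cons v t =>
    rw [PySem.List.sorted_rev_eq_foldl_insertBy, pvMaxCons]
    simp only [List.foldl]
    rw [show PySem.List.insertBy (fun a b => decide (key b < key a)) v [] = [v] from by
      simp [PySem.List.insertBy]]
    exact pvHeadFoldInsert key t [v] v rfl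

-- max? returns the first element of maximal key
theorem pvMaxFirst {α : Type} (key : α → Int) :
    ∀ (ws : List α) (i : Nat) (hi : i < ws.length),
    (∀ j (hj : j < ws.length), key ws[j] ≤ key ws[i]) →
    (∀ j (hj : j < i), key (ws[j]'(Nat.lt_trans hj hi)) < key ws[i]) →
    PySem.List.max? ws key = some ws[i] := by
  intro ws
  induction ws with
  | nil => intro i hi; exact absurd hi (Nat.not_lt_zero i)
  | cons x t ih =>
    intro i hi hmax hfirst
    cases i with
    | zero =>
      rw [pvMaxCons]
      simp only [List.getElem_cons_zero]
      congr 1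
      have : ∀ (t' : List α), (∀ y ∈ t', key y ≤ key x) →
          t'.foldl (fun m z => if key m < key z then z else m) x = x := by
        intro t'
        induction t' with
        | nil => intro _; rfl
        | cons y t' ih' =>
          intro h
          have hy : ¬ key x < key y := not_lt.mpr (h y (List.mem_cons_self))
          simp only [List.foldl, if_neg hy]
          exact ih' (fun z hz => h z (List.mem_cons_of_mem _ hz))
      exact this t (fun y hy => by
        obtain ⟨j, hj, rfl⟩ := List.getElem_of_mem hy
        exact hmax (j + 1) (by simpa using hj))
    | succ j =>
      have hj : j < t.length := by simpa using hi
      have hx : key x < key t[j] := by simpa using hfirst 0 (Nat.succ_pos j)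
      have htl := ih j hj
        (fun k hk => by simpa using hmax (k + 1) (by simpa using hk))
        (fun k hk => by simpa using hfirst (k + 1) (by simpa using hk))
      cases t with
      | nil => exact absurd hj (Nat.not_lt_zero j)
      | cons v t' =>
        rw [pvMaxCons] at htl ⊢
        simp only [List.foldl] at htl ⊢
        by_cases hxv : key x < key v
        · simp only [if_pos hxv]
          simpa using htl
        · simp only [if_neg hxv]
          -- x replaces v as the seed; show the folds agree because some later element beats both
          have hxfold : ∀ (t'' : List α) (b c : α), key c ≤ key b → (∃ z ∈ t'', key b < key z) →
              t''.foldl (fun m z => if key m < key z then z else m) b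
                = t''.foldl (fun m z => if key m < key z then z else m) c := by
            intro t''
            induction t'' with
            | nil => intro b c _ hz; obtain ⟨z, hz, _⟩ := hz; cases hz
            | cons w t'' ih'' =>
              intro b c hcb hz
              simp only [List.foldl]
              by_cases hw : key b < key w
              · have hcw : key c < key w := lt_of_le_of_lt hcb hw
                simp [hw, hcw]
              · obtain ⟨z, hzmem, hzgt⟩ := hz
                have hzt : z ∈ t'' := by
                  rcases List.mem_cons.mp hzmem with h | h
                  · exact absurd (h ▸ hzgt) hw
                  · exact h
                simp only [if_neg hw]
                by_cases hcw : key c < key w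
                · simp only [if_pos hcw]
                  exact ih'' b w (not_lt.mp hw) ⟨z, hzt, hzgt⟩
                · simp only [if_neg hcw]
                  exact ih'' b c hcb ⟨z, hzt, hzgt⟩
          cases j with
          | zero =>
            exact absurd (by simpa using hx) hxv
          | succ j' =>
            have hj' : j' < t'.length := by simpa using hj
            have hbeats : ∃ z ∈ t', key v < key z := by
              refine ⟨t'[j'], List.getElem_mem hj', ?_⟩
              simpa using hfirst 1 (Nat.succ_lt_succ (Nat.zero_lt_succ j'))
            have hbeatsx : ∃ z ∈ t', key x < key z := by
              refine ⟨t'[j'], List.getElem_mem hj', ?_⟩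
              simpa using hx
            rw [hxfold t' x v (not_lt.mp hxv) hbeatsx] at *
            simpa using htl
  
-- the filter predicate agrees with startswith on nonempty words and a one-char start
theorem pvPredEqStartswith (s start : String) (hs : s.toList ≠ []) (h1 : start.toList.length = 1) :
    ((PySem.Str.pyGet? s 0).map (fun c => String.ofList [c]) == some start)
      = PySem.Str.startswith s start := by
  obtain ⟨a, rest, hsl⟩ : ∃ a rest, s.toList = a :: rest := by
    cases h : s.toList with
    | nil => exact absurd h hs
    | cons a rest => exact ⟨a, rest, rfl⟩
  obtain ⟨c, hcl⟩ : ∃ c, start.toList = [c] := by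
    cases h : start.toList with
    | nil => simp [h] at h1
    | cons c cs =>
      cases cs with
      | nil => exact ⟨c, rfl⟩
      | cons d ds => simp [h] at h1
  have hget : PySem.Str.pyGet? s 0 = some a := by
    have h0 : PySem.Str.pyGet? s ((0 : Nat) : Int) = s.toList[(0 : Nat)]? :=
      PySem.Str.pyGet?_natCast s 0
    rw [hsl] at h0
    exact h0
  have hsw : PySem.Str.startswith s start = (c == a) := by
    simp [PySem.Str.startswith, PySem.Chars.startswith, hsl, hcl, List.isPrefixOf]
  rw [hget, hsw]
  have hstart : start = String.ofList [c] := by rw [← hcl, String.ofList_toList]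
  subst hstart
  by_cases hac : a = c
  · subst hac; simp
  · have hne1 : (String.ofList [a] = String.ofList [c]) = False := by
      simp only [eq_iff_iff, iff_false]
      intro h
      exact hac (by have := congrArg String.toList h; simpa using this)
    simp [hne1, Ne.symm hac]

-- ===== VERDICT (by name: the statement is the Claim_ definition above) =====
theorem get_longest_words_startswith_spec : Claim_equal_get_longest_words_startswith := by
  intro words start _ hpre
  obtain ⟨hne0, h1, _, hex⟩ := hpre
  have hne : ∀ w ∈ words, w.toList ≠ [] := by
    intro w hw
    have := List.all_eq_true.mp hne0 w hw
    simpa using this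
  obtain ⟨w, hwmem, hwsw⟩ := List.any_eq_true.mp hex
  unfold Spec_get_longest_words_startswith
  set pred := fun s => ((PySem.Str.pyGet? s 0).map (fun c => String.ofList [c]) == some start) with hpred
  set ws := words.filter pred with hws
  -- B's filter is A's filter
  have hfeq : words.filter (fun s => PySem.Str.startswith s start) = ws := by
    rw [hws]
    apply List.filter_congr
    intro s hs
    exact (pvPredEqStartswith s start (hne s hs) h1).symm
  -- the filtered list is nonempty
  have hwpredw : pred w = true := by
    show ((PySem.Str.pyGet? w 0).map (fun c => String.ofList [c]) == some start) = true
    rw [pvPredEqStartswith w start (hne w hwmem) h1]; exact hwsw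
  have hwin : w ∈ ws := List.mem_filter.mpr ⟨hwmem, hwpredw⟩
  have hwsne : ws ≠ [] := List.ne_nil_of_mem hwin
  have hlensne : ws.map PySem.Str.len ≠ [] := by simp [hwsne]
  -- A's max over the length list succeeds
  obtain ⟨m, hm⟩ : ∃ m, PySem.List.max? (ws.map PySem.Str.len) (fun x => x) = some m := by
    cases h : PySem.List.max? (ws.map PySem.Str.len) (fun x => x) with
    | none => exact absurd ((PySem.List.max?_eq_none_iff _ _).mp h) hlensne
    | some m => exact ⟨m, rfl⟩
  have hmmem : m ∈ ws.map PySem.Str.len := PySem.List.max?_mem hm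
  obtain ⟨i, hidx⟩ : ∃ i, PySem.List.index? (ws.map PySem.Str.len) m = some i := by
    have := (PySem.List.index?_isSome_iff (ws.map PySem.Str.len) m).mpr hmmem
    cases h : PySem.List.index? (ws.map PySem.Str.len) m with
    | none => rw [h] at this; simp at this
    | some i => exact ⟨i, rfl⟩
  obtain ⟨hilen, hival, hifirst⟩ := PySem.List.getElem_of_index?_eq_some hidx
  have hiws : i < ws.length := by simpa using hilen
  have hmax : ∀ y ∈ ws.map PySem.Str.len, y ≤ m := PySem.List.max?_isMax hm
  -- the keyed max is the same element; B's sorted head equals it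
  have hBval : PySem.List.max? ws PySem.Str.len = some (ws[i]'hiws) := by
    apply pvMaxFirst PySem.Str.len ws i hiws
    · intro j hj
      have : (ws.map PySem.Str.len)[j]'(by simpa using hj) ≤ m :=
        hmax _ (List.getElem_mem _)
      simpa [← hival] using this
    · intro j hj
      have hjlen : j < (ws.map PySem.Str.len).length := Nat.lt_trans hj hilen
      have hle : (ws.map PySem.Str.len)[j]'hjlen ≤ m := hmax _ (List.getElem_mem _)
      have hlt : (ws.map PySem.Str.len)[j]'hjlen < m := lt_of_le_of_ne hle (hifirst j hj)
      simpa [← hival] using hlt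
  have hA : get_longest_words_startswith words start = ws.getD i "" := by
    show (match PySem.List.max? (ws.map PySem.Str.len) (fun x => x) with
          | none => ""
          | some m =>
            match PySem.List.index? (ws.map PySem.Str.len) m with
            | none => ""
            | some i => ws.getD i "") = ws.getD i ""
    simp only [hm, hidx]
  have hB : get_longest_words_startswith_alt words start = ws[i]'hiws := by
    show (match PySem.List.pyGet?
            (PySem.List.sorted (words.filter (fun s => PySem.Str.startswith s start))
              PySem.Str.len true) 0 with
          | none => ""
          | some w => w) = ws[i]'hiws
    rw [hfeq, pvPyGetZero, pvHeadSortedRev, hBval]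
  rw [hA, hB]
  simp [List.getD_eq_getElem?_getD, hiws]
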